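-- pv_equiv track=rewrite | github.com/nrhint/Python-School | Math/Algebra2/Factor.py | reduced_sqrt
-- ===== SOURCE A (Python) =====
-- from math import sqrt
--
-- def reduced_sqrt(n):
--     n = int(n)
--     try:
--         root = int(sqrt(n))
--     except ValueError:
--         root = int(sqrt(n*-1))
--     for factor_root in range(root, 1, -1):
--         factor = factor_root * factor_root
--         if n % factor == 0:
--             reduced = n // factor
--             return (factor_root, reduced)
--     return (1, n)
-- ===== SOURCE B (Python) =====
-- def reduced_sqrt(n):
--     n = int(n)
--     if n == 0:
--         return (1, 0)
--     m = abs(n)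
--     root = 1
--     p = 2
--     while p * p <= m:
--         if m % (p * p) == 0:
--             m //= p * p
--             root *= p
--         else:
--             p += 1
--     return (root, n // (root * root))
-- ===== Notes on version B (the rewrite author's own statement) =====
-- stated objective: alternative
-- what changed: A scans candidate roots downward from int(sqrt(|n|)) testing n % k*k == 0 and returns at the first hit; B instead extracts square factors by ascending trial division (dividing p*p out of |n| whenever it divides, else incrementing p) and accumulates the root as a product.
import Mathlib
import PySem

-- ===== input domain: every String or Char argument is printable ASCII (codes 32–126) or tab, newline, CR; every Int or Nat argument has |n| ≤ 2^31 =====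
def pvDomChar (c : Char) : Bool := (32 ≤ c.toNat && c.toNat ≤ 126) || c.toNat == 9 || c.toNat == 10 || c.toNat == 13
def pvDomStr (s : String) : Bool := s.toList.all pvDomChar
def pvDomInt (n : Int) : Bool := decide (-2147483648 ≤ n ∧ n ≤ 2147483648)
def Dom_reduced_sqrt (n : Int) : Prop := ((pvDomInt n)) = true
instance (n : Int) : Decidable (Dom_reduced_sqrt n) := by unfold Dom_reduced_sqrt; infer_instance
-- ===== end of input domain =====

-- B replaces A's downward scan over candidate roots by ascending trial division that divides
-- square factors out of |n| (objective: alternative algorithm, similar worst-case cost).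

-- ===== PORT A =====
-- the for-loop 'for factor_root in range(root, 1, -1)': counts down from root to 2.
def aLoop (n : Int) : Nat → Int × Int
  | 0 => (1, n)
  | 1 => (1, n)
  | (k+2) =>
      let factor : Int := ((k+2 : Nat) : Int) * ((k+2 : Nat) : Int)
      if PySem.Int.mod n factor = 0 then (((k+2 : Nat) : Int), PySem.Int.floordiv n factor)
      else aLoop n (k+1)

-- 'root = int(sqrt(n))' (with the except-branch using -n for negative n) is ported as
-- Nat.sqrt n.natAbs: exact on Dom (|n| ≤ 2^31 < 2^53, where the correctly rounded double
-- sqrt truncates to the integer square root).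
def reduced_sqrt (n : Int) : Int × Int :=
  aLoop n (Nat.sqrt n.natAbs)

-- ===== PORT B =====
-- the while-loop of Source B; fuel = 3*m+3 is a totality device only, always sufficient.
def bLoop : Nat → Nat → Nat → Nat → Nat
  | 0, _, _, root => root
  | (fuel+1), m, p, root =>
      if p * p ≤ m then
        (if m % (p * p) = 0 then bLoop fuel (m / (p * p)) p (root * p)
         else bLoop fuel m (p + 1) root)
      else root

def reduced_sqrt_alt (n : Int) : Int × Int :=
  if n = 0 then (1, 0)
  else
    let m := n.natAbs
    let root := bLoop (3 * m + 3) m 2 1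
    ((root : Int), PySem.Int.floordiv n ((root : Int) * (root : Int)))

-- ===== PRECONDITION & SPEC =====
def Spec_reduced_sqrt (n : Int) (out : Int × Int) : Prop := out = reduced_sqrt_alt n
instance (n : Int) (out : Int × Int) : Decidable (Spec_reduced_sqrt n out) := by unfold Spec_reduced_sqrt; infer_instance

-- ===== CLAIM (what is proved, stated in full; the proofs are below) =====
def Claim_equal_reduced_sqrt : Prop := ∀ (n : Int), Dom_reduced_sqrt n → Spec_reduced_sqrt n (reduced_sqrt n)

-- ===== LEMMAS AND PROOFS =====

-- S m = the largest k with k*k ∣ m (for m ≥ 1); both loops compute it.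
def S (m : Nat) : Nat := Nat.findGreatest (fun k => k * k ∣ m) m

lemma S_pos {m : Nat} (hm : 1 ≤ m) : 1 ≤ S m :=
  Nat.le_findGreatest hm (by simp)

lemma S_spec {m : Nat} (hm : 1 ≤ m) : S m * S m ∣ m :=
  Nat.findGreatest_spec (P := fun k => k * k ∣ m) (m := 1) hm (by simp)

lemma S_max {m k : Nat} (hm : 1 ≤ m) (hk : k * k ∣ m) : k ≤ S m := by
  rcases Nat.eq_zero_or_pos k with h0 | h1
  · simp [h0]
  · exact Nat.le_findGreatest
      (le_trans (Nat.le_mul_of_pos_left k h1) (Nat.le_of_dvd hm hk)) hk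

lemma S_le_sqrt {m : Nat} (hm : 1 ≤ m) : S m ≤ Nat.sqrt m :=
  Nat.le_sqrt.2 (Nat.le_of_dvd hm (S_spec hm))

-- dividing an even-exponent block p*p out: S (p*p*b) = p * S b
lemma S_mul {p b : Nat} (hp : 1 ≤ p) (hb : 1 ≤ b) : S (p * p * b) = p * S b := by
  have hmb : 1 ≤ p * p * b := by nlinarith
  apply Nat.le_antisymm
  · -- S (p*p*b) ≤ p * S b via the gcd argument
    set k := S (p * p * b) with hkdef
    have hk : k * k ∣ p * p * b := S_spec hmb
    set d := Nat.gcd k p with hd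
    have hdp : d ∣ p := Nat.gcd_dvd_right k p
    have hdk : d ∣ k := Nat.gcd_dvd_left k p
    have hdpos : 0 < d := Nat.gcd_pos_of_pos_right k hp
    obtain ⟨k1, hk1⟩ := hdk
    obtain ⟨p1, hp1⟩ := hdp
    have hp1pos : 1 ≤ p1 := by
      rcases Nat.eq_zero_or_pos p1 with h | h
      · subst h; rw [Nat.mul_zero] at hp1; omega
      · exact h
    have hdvd : k1 * k1 ∣ p1 * p1 * b := by
      have h2 : (d * d) * (k1 * k1) ∣ (d * d) * (p1 * p1 * b) := by
        have : k * k = (d * d) * (k1 * k1) := by rw [hk1]; ring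
        have hrw : p * p * b = (d * d) * (p1 * p1 * b) := by rw [hp1]; ring
        rw [← this, ← hrw]; exact hk
      exact (mul_dvd_mul_iff_left (by positivity : (d * d) ≠ 0)).1 h2
    have hcop : Nat.Coprime k1 p1 := by
      have := Nat.coprime_div_gcd_div_gcd (m := k) (n := p) hdpos
      have e1 : k / d = k1 := by rw [hk1]; exact Nat.mul_div_cancel_left k1 hdpos
      have e2 : p / d = p1 := by rw [hp1]; exact Nat.mul_div_cancel_left p1 hdpos
      rwa [e1, e2] at this
    have hcop2 : Nat.Coprime (k1 * k1) (p1 * p1) :=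
      (hcop.mul_right hcop).mul_left (hcop.mul_right hcop)
    have hk1b : k1 * k1 ∣ b := hcop2.dvd_of_dvd_mul_left hdvd
    have hk1S : k1 ≤ S b := S_max hb hk1b
    calc k = d * k1 := hk1
      _ ≤ d * (p1 * S b) := Nat.mul_le_mul_left d (le_trans hk1S (Nat.le_mul_of_pos_left _ hp1pos))
      _ = (d * p1) * S b := by ring
      _ = p * S b := by rw [← hp1]
  · -- p * S b ≤ S (p*p*b)
    apply S_max hmb
    obtain ⟨c, hc⟩ := S_spec hb
    refine ⟨c, ?_⟩
    conv_lhs => rw [hc]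
    ring

lemma S_eq_one {m p : Nat} (hm : 1 ≤ m) (hall : ∀ q, 2 ≤ q → q < p → ¬ q * q ∣ m)
    (hlt : m < p * p) : S m = 1 := by
  have h1 := S_pos hm
  by_contra hne
  have h2 : 2 ≤ S m := by omega
  have hdvd := S_spec hm
  have hle : S m * S m ≤ m := Nat.le_of_dvd hm hdvd
  have hSp : S m < p := by
    by_contra hge
    rw [not_lt] at hge
    have : p * p ≤ S m * S m := Nat.mul_le_mul hge hge
    omega
  exact hall (S m) h2 hSp hdvd

lemma bLoop_eq : ∀ (fuel m p root : Nat), 1 ≤ m → 2 ≤ p →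
    (∀ q, 2 ≤ q → q < p → ¬ q * q ∣ m) → 3 * m + 3 ≤ fuel + p →
    bLoop fuel m p root = root * S m := by
  intro fuel
  induction fuel with
  | zero =>
      intro m p root hm hp hall hfuel
      have hlt : m < p * p := by
        have hpm : m < p := by omega
        have : p ≤ p * p := Nat.le_mul_of_pos_left p (by omega)
        omega
      simp [bLoop, S_eq_one hm hall hlt]
  | succ fuel ih =>
      intro m p root hm hp hall hfuel
      by_cases hguard : p * p ≤ m
      · by_cases hdvd : m % (p * p) = 0
        · have hpp : p * p ∣ m := Nat.dvd_of_mod_eq_zero hdvd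
          obtain ⟨m', hm'⟩ := hpp
          have hm'1 : 1 ≤ m' := by
            rcases Nat.eq_zero_or_pos m' with h | h
            · subst h; rw [Nat.mul_zero] at hm'; omega
            · exact h
          have hm4 : 4 ≤ m := le_trans (by nlinarith : 4 ≤ p * p) hguard
          have hdivm' : m / (p * p) = m' := by
            rw [hm']; exact Nat.mul_div_cancel_left m' (by positivity)
          have h4m' : 4 * m' ≤ m := by
            have : 4 * m' ≤ (p * p) * m' := Nat.mul_le_mul_right m' (by nlinarith)
            omega
          have hall' : ∀ q, 2 ≤ q → q < p → ¬ q * q ∣ m' := by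
            intro q h2 hq hd
            exact hall q h2 hq (hd.trans ⟨p * p, by rw [hm']; ring⟩)
          have hfuel' : 3 * m' + 3 ≤ fuel + p := by clear hm' hdivm'; omega
          have := ih m' p (root * p) hm'1 hp hall' hfuel'
          simp only [bLoop, if_pos hguard, if_pos hdvd, hdivm', this]
          rw [hm', S_mul (by omega) hm'1]
          ring
        · have hall' : ∀ q, 2 ≤ q → q < p + 1 → ¬ q * q ∣ m := by
            intro q h2 hq hd
            rcases Nat.lt_succ_iff_lt_or_eq.1 hq with h | h
            · exact hall q h2 h hd
            · subst h; exact hdvd (Nat.mod_eq_zero_of_dvd hd)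
          have := ih m (p + 1) root hm (by omega) hall' (by omega)
          simp only [bLoop, if_pos hguard, if_neg hdvd, this]
      · rw [not_le] at hguard
        simp [bLoop, if_neg (not_le.2 hguard), S_eq_one hm hall hguard]

lemma aLoop_eq (n : Int) (hm : 1 ≤ n.natAbs) :
    ∀ k, S n.natAbs ≤ k →
      aLoop n k = ((S n.natAbs : Int), PySem.Int.floordiv n ((S n.natAbs : Int) * (S n.natAbs : Int)))
  | 0, h => by
      have := S_pos hm; omega
  | 1, h => by
      have h1 := S_pos hm
      have hS : S n.natAbs = 1 := by omega
      rw [hS]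
      have hfd : PySem.Int.floordiv n (((1 : Nat) : Int) * ((1 : Nat) : Int)) = n := by
        rw [show ((1 : Nat) : Int) * ((1 : Nat) : Int) = 1 by norm_num,
          PySem.Int.floordiv_eq_ediv_of_pos one_pos, Int.ediv_one]
      rw [hfd]
      rfl
  | (k+2), h => by
      have hdvd_iff : PySem.Int.mod n (((k+2 : Nat) : Int) * ((k+2 : Nat) : Int)) = 0 ↔
          (k+2) * (k+2) ∣ n.natAbs := by
        rw [PySem.Int.mod_eq_zero_iff_dvd]
        constructor
        · intro hd
          have h2 : (((k+2) * (k+2) : Nat) : Int) ∣ n := by push_cast; exact hd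
          exact Int.natCast_dvd_natCast.1 (Int.dvd_natAbs.2 h2)
        · intro hd
          have h2 : (((k+2) * (k+2) : Nat) : Int) ∣ n :=
            Int.dvd_natAbs.1 (Int.natCast_dvd_natCast.2 hd)
          push_cast at h2
          exact h2
      by_cases htest : PySem.Int.mod n (((k+2 : Nat) : Int) * ((k+2 : Nat) : Int)) = 0
      · have hk : (k+2) ≤ S n.natAbs := S_max hm (hdvd_iff.1 htest)
        have hS : S n.natAbs = k + 2 := by omega
        simp only [aLoop, if_pos htest, hS]
      · have hne : S n.natAbs ≠ k + 2 := by
          intro heq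
          exact htest (hdvd_iff.2 (by rw [← heq]; exact S_spec hm))
        have hle : S n.natAbs ≤ k + 1 := by omega
        simp only [aLoop, if_neg htest]
        exact aLoop_eq n hm (k+1) hle

-- ===== VERDICT (by name: the statement is the Claim_ definition above) =====
theorem reduced_sqrt_spec : Claim_equal_reduced_sqrt := by
  intro n _
  unfold Spec_reduced_sqrt
  by_cases hn : n = 0
  · subst hn; decide
  · have hm : 1 ≤ n.natAbs := Int.natAbs_pos.2 hn
    have hA := aLoop_eq n hm (Nat.sqrt n.natAbs) (S_le_sqrt hm)
    have hB := bLoop_eq (3 * n.natAbs + 3) n.natAbs 2 1 hm (le_refl 2)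
      (by intro q h2 hq; omega) (by omega)
    rw [reduced_sqrt, hA, reduced_sqrt_alt, if_neg hn]
    simp only [hB, one_mul]
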